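-- pv_equiv track=rewrite | github.com/Chaluka/Algorithms | Compression/bwt.py | __initiate_lf_mapping
-- ===== SOURCE A (Python) =====
-- def __initiate_lf_mapping(bwt:str):
--
--     n = len(bwt)
--     rank = dict()
--     count = dict()
--     occ = [0 for i in range(n)]
--     # fill count array
--     counter = 0
--     for char in bwt:
--         if char in count:
--             count[char] += 1
--         else:
--             count[char] = 1
--             rank[char] = 1
--         occ[counter] = count[char] - 1
--         counter += 1
--
--     for i in range(1, len(count)):
--         prev = sorted(count)[i - 1]
--         cur = sorted(count)[i]
--         rank[cur] = rank[prev] + count[prev]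
--
--     return rank, occ
-- ===== SOURCE B (Python) =====
-- def __initiate_lf_mapping(bwt: str):
--     count = {}
--     occ = []
--     for ch in bwt:
--         occ.append(count.get(ch, 0))
--         count[ch] = count.get(ch, 0) + 1
--     first = sorted(bwt)
--     rank = {c: first.index(c) + 1 for c in count}
--     return rank, occ
-- ===== Notes on version B (the rewrite author's own statement) =====
-- stated objective: idiomatic
-- what changed: A's second pass computes ranks by a cumulative sum over the distinct characters, re-sorting the key set twice per iteration, and its first pass pre-allocates occ and assigns by index; B builds occ by appending and reads each rank directly off the sorted first column as first.index(c) + 1 in a dict comprehension.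
import Mathlib
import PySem

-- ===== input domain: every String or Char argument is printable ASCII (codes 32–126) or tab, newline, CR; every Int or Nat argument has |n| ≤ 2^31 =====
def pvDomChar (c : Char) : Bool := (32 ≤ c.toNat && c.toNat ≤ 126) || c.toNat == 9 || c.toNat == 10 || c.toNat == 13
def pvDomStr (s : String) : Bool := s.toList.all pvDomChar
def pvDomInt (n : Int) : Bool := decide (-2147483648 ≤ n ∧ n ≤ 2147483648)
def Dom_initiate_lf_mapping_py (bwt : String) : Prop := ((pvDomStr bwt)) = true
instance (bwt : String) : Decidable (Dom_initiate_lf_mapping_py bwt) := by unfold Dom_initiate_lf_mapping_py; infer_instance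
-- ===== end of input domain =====

-- B replaces A's cumulative-sum pass over the repeatedly re-sorted distinct keys by reading each
-- rank directly off the sorted first column (first.index(c) + 1); the occurrence pass appends
-- instead of pre-allocating. Objective: idiomatic.


-- B replaces A's cumulative-sum pass over the repeatedly re-sorted distinct keys by reading each
-- rank directly off the sorted first column (first.index(c) + 1); the occurrence pass appends
-- instead of pre-allocating a zero list. Objective: idiomatic.

-- ===== PORT A =====
-- loop state: (rank, count, occ, counter); occ[counter] = ... is ported as List.set (exact: counter
-- is always in range), and count[char]/rank[prev]/count[prev] lookups as getD 0 (exact: the key is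
-- always present at those reads)

def pvStepA (s : PySem.Dict String Int × PySem.Dict String Int × List Int × Nat) (char : String) :
    PySem.Dict String Int × PySem.Dict String Int × List Int × Nat :=
  if s.2.1.contains char then
    let count := s.2.1.insert char (s.2.1.getD char 0 + 1)
    (s.1, count, s.2.2.1.set s.2.2.2 (count.getD char 0 - 1), s.2.2.2 + 1)
  else
    let count := s.2.1.insert char 1
    let rank := s.1.insert char 1
    (rank, count, s.2.2.1.set s.2.2.2 (count.getD char 0 - 1), s.2.2.2 + 1)

def initiate_lf_mapping_py (bwt : String) : (List (String × Int)) × List Int :=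
  let n := bwt.toList.length
  let s := (bwt.toList.map Char.toString).foldl pvStepA
      (PySem.Dict.empty, PySem.Dict.empty, List.replicate n 0, 0)
  let count := s.2.1
  let rank2 := (PySem.List.pyRange 1 (count.size : Int) 1).foldl (fun rank i =>
      let prev := PySem.List.pyGetD (PySem.List.sorted count.keys (fun x => x) false) (i - 1) ""
      let cur := PySem.List.pyGetD (PySem.List.sorted count.keys (fun x => x) false) i ""
      rank.insert cur (rank.getD prev 0 + count.getD prev 0)) s.1
  (rank2.items, s.2.2.1)

-- ===== PORT B =====
-- loop state: (count, occ); first.index(c) always finds c, so .getD 0 is exact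

def pvStepB (s : PySem.Dict String Int × List Int) (ch : String) :
    PySem.Dict String Int × List Int :=
  (s.1.insert ch (s.1.getD ch 0 + 1), s.2 ++ [s.1.getD ch 0])

def initiate_lf_mapping_py_alt (bwt : String) : (List (String × Int)) × List Int :=
  let chars := bwt.toList.map Char.toString
  let s := chars.foldl pvStepB (PySem.Dict.empty, [])
  let first := PySem.List.sorted chars (fun x => x) false
  let rank := s.1.keys.map (fun c => (c, ((PySem.List.index? first c).getD 0 : Int) + 1))
  (rank, s.2)

-- ===== PRECONDITION & SPEC =====
def Spec_initiate_lf_mapping_py (bwt : String) (out : (List (String × Int)) × List Int) : Prop := out = initiate_lf_mapping_py_alt bwt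
instance (bwt : String) (out : (List (String × Int)) × List Int) : Decidable (Spec_initiate_lf_mapping_py bwt out) := by unfold Spec_initiate_lf_mapping_py; infer_instance

-- ===== CLAIM (what is proved, stated in full; the proofs are below) =====
def Claim_equal_initiate_lf_mapping_py : Prop := ∀ (bwt : String), Dom_initiate_lf_mapping_py bwt → Spec_initiate_lf_mapping_py bwt (initiate_lf_mapping_py bwt)

-- ===== LEMMAS AND PROOFS =====

lemma pv_loopA (cs : List String) : ∀ (count : PySem.Dict String Int) (done : List Int),
    cs.foldl pvStepA (PySem.Dict.mk (count.keys.map (fun k => (k, (1:Int)))), count,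
        done ++ List.replicate cs.length 0, done.length) =
      (PySem.Dict.mk ((cs.foldl pvStepB (count, done)).1.keys.map (fun k => (k, (1:Int)))),
       (cs.foldl pvStepB (count, done)).1,
       (cs.foldl pvStepB (count, done)).2,
       done.length + cs.length) := by
  induction cs with
  | nil => intro count done; simp
  | cons c cs ih =>
    intro count done
    by_cases h : count.contains c = true
    · have hrk : (PySem.Dict.mk (count.keys.map (fun k => (k, (1:Int))))) =
          PySem.Dict.mk ((count.insert c (count.getD c 0 + 1)).keys.map (fun k => (k, (1:Int)))) := by
        rw [PySem.Dict.keys_insert_of_contains _ _ h]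
      have hocc : (done ++ List.replicate (c :: cs).length 0).set done.length (count.getD c 0) =
          (done ++ [count.getD c 0]) ++ List.replicate cs.length 0 := by
        simp [List.replicate_succ]
      simp only [List.foldl_cons, pvStepA, h, if_true, PySem.Dict.getD_insert_self]
      rw [show count.getD c 0 + 1 - 1 = count.getD c 0 by ring]
      rw [hocc, hrk]
      have := ih (count.insert c (count.getD c 0 + 1)) (done ++ [count.getD c 0])
      simp only [pvStepB]
      norm_num at this ⊢
      rw [this]
      simp [Prod.mk.injEq]
      omega
    · have hcg : count.getD c 0 = 0 := PySem.Dict.getD_of_not_contains _ 0 (by simpa using h)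
      have hck : c ∉ count.keys := fun hm => h ((PySem.Dict.contains_iff_mem_keys _ _).mpr hm)
      have hrkc : (PySem.Dict.mk (count.keys.map (fun k => (k, (1:Int))))).contains c = false := by
        simp only [PySem.Dict.contains_mk]
        simp
        exact fun x hx e => hck (e ▸ hx)
      have hrk : (PySem.Dict.mk (count.keys.map (fun k => (k, (1:Int))))).insert c 1 =
          PySem.Dict.mk ((count.insert c 1).keys.map (fun k => (k, (1:Int)))) := by
        apply PySem.Dict.ext
        rw [PySem.Dict.items_insert_of_not_contains _ _ hrkc,
            PySem.Dict.keys_insert_of_not_contains _ _ (by simpa using h)]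
        simp
      have hocc : (done ++ List.replicate (c :: cs).length 0).set done.length ((0:Int)) =
          (done ++ [(0:Int)]) ++ List.replicate cs.length 0 := by
        simp [List.replicate_succ]
      simp only [List.foldl_cons, pvStepA, h, if_false, Bool.false_eq_true,
        PySem.Dict.getD_insert_self]
      rw [show (1:Int) - 1 = 0 from by ring, hocc, hrk]
      have hB : pvStepB (count, done) c = (count.insert c 1, done ++ [(0:Int)]) := by
        simp [pvStepB, hcg]
      rw [hB]
      have := ih (count.insert c 1) (done ++ [(0:Int)])
      norm_num at this ⊢
      rw [this]
      simp [Prod.mk.injEq]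
      omega

lemma pv_stepB_fst (cs : List String) : ∀ (d : PySem.Dict String Int) (o : List Int),
    (cs.foldl pvStepB (d, o)).1 = cs.foldl (fun d x => d.insert x (d.getD x 0 + 1)) d := by
  induction cs with
  | nil => intro d o; rfl
  | cons c cs ih => intro d o; simp only [List.foldl_cons, pvStepB]; exact ih _ _

lemma pv_countP_cons_mem (a : String) (l : List String) (ha : a ∉ l) (cs : List String) :
    cs.countP (fun x => decide (x ∈ a :: l)) = cs.count a + cs.countP (fun x => decide (x ∈ l)) := by
  induction cs with
  | nil => simp
  | cons c cs ih =>
    simp only [List.countP_cons, List.count_cons, ih]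
    by_cases hc : c = a
    · subst hc; simp [ha]; omega
    · by_cases hl : c ∈ l <;> simp [hc, hl] <;> omega

lemma pv_countP_mem (cs : List String) : ∀ (l : List String), l.Nodup →
    (cs.countP (fun x => decide (x ∈ l)) : Int) = (l.map (fun v => (cs.count v : Int))).sum := by
  intro l hl
  induction l with
  | nil => simp
  | cons a l ih =>
    rw [pv_countP_cons_mem a l (by simp_all) cs]
    push_cast
    rw [ih (by simp_all)]
    simp

lemma pv_index_sorted (c : String) : ∀ (l : List String), l.Pairwise (· ≤ ·) → c ∈ l →
    PySem.List.index? l c = some (l.countP (fun x => decide (x < c))) := by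
  intro l
  induction l with
  | nil => intro _ hc; cases hc
  | cons a l ih =>
    intro hs hc
    by_cases hac : a = c
    · subst hac
      have h0 : (a :: l).countP (fun x => decide (x < a)) = 0 := by
        rw [List.countP_eq_zero]
        intro x hx
        simp only [List.mem_cons] at hx
        rcases hx with rfl | hx
        · simp
        · have hle := (List.pairwise_cons.mp hs).1 x hx
          simpa using not_lt.mpr hle
      rw [PySem.List.index?_cons_self, h0]
    · have hcl : c ∈ l := by
        rcases List.mem_cons.mp hc with rfl | h
        · exact absurd rfl hac
        · exact h
      have halt : a < c := lt_of_le_of_ne ((List.pairwise_cons.mp hs).1 c hcl) hac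
      rw [PySem.List.index?_cons_of_ne l hac, ih (List.pairwise_cons.mp hs).2 hcl]
      simp [List.countP_cons, Nat.add_comm]
      exact String.lt_iff_toList_lt.mp halt

-- the value the sequential pass assigns at position j of the sorted key list,
-- as a count over the original string list

lemma pv_take_sum (cs : List String) (j : Nat)
    (hj : j < (PySem.List.sorted (PySem.Set.ofList cs) (fun x => x) false).length) :
    (((PySem.List.sorted (PySem.Set.ofList cs) (fun x => x) false).take j).map
        (fun v => (cs.count v : Int))).sum =
      (cs.countP (fun x => decide (x < (PySem.List.sorted (PySem.Set.ofList cs) (fun x => x) false)[j])) : Int) := by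
  set sk := PySem.List.sorted (PySem.Set.ofList cs) (fun x => x) false with hsk
  have hperm : sk.Perm (PySem.Set.ofList cs) := PySem.List.sorted_perm _ _ _
  have hnd : sk.Nodup := hperm.nodup_iff.mpr (PySem.Set.nodup_ofList cs)
  have hlt : sk.Pairwise (· < ·) := PySem.List.sorted_ofList_pairwise_lt cs
  have hmem : ∀ x ∈ cs, x ∈ sk := by
    intro x hx
    exact hperm.mem_iff.mpr (by simpa using (PySem.Set.mem_ofList _ _).mpr hx)
  have hcong : cs.countP (fun x => decide (x < sk[j])) =
      cs.countP (fun x => decide (x ∈ sk.take j)) := by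
    apply List.countP_congr
    intro x hx
    simp only [decide_eq_true_eq]
    have hxsk := hmem x hx
    have hi : sk.idxOf x < sk.length := List.idxOf_lt_length_of_mem hxsk
    have hgx : sk[sk.idxOf x] = x := List.getElem_idxOf hi
    constructor
    · intro hlt'
      have hij : sk.idxOf x < j := by
        by_contra hge
        push_neg at hge
        rcases Nat.eq_or_lt_of_le hge with heq | hltj
        · subst heq
          rw [hgx] at hlt'
          exact lt_irrefl _ hlt'
        · have := List.pairwise_iff_getElem.mp hlt j (sk.idxOf x) hj hi hltj
          rw [hgx] at this
          exact lt_irrefl _ (this.trans hlt')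
      rw [← hgx]
      exact List.mem_take_iff_getElem.mpr ⟨sk.idxOf x, by omega, by simp⟩
    · intro hxt
      rcases List.mem_take_iff_getElem.mp hxt with ⟨i, hi', hgi⟩
      have : sk[i] < sk[j] := List.pairwise_iff_getElem.mp hlt i j (by omega) hj (by omega)
      rw [hgi] at this
      exact this
  rw [hcong, pv_countP_mem cs (sk.take j) (hnd.sublist (List.take_sublist _ _))]

def pvR (cs : List String) (j : Nat) : Int :=
  1 + (((PySem.List.sorted (PySem.Set.ofList cs) (fun x => x) false).take j).map
      (fun v => (cs.count v : Int))).sum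

lemma pv_loop2 (cs : List String) : ∀ (t : Nat), t ≤ (PySem.Set.ofList cs).length →
    (PySem.List.pyRange 1 (t : Int) 1).foldl
      (fun rank i =>
        rank.insert
          (PySem.List.pyGetD (PySem.List.sorted (PySem.Dict.counter cs).keys (fun x => x) false) i "")
          (rank.getD (PySem.List.pyGetD (PySem.List.sorted (PySem.Dict.counter cs).keys (fun x => x) false) (i - 1) "") 0
            + (PySem.Dict.counter cs).getD (PySem.List.pyGetD (PySem.List.sorted (PySem.Dict.counter cs).keys (fun x => x) false) (i - 1) "") 0))
      (PySem.Dict.mk ((PySem.Set.ofList cs).map (fun k => (k, (1 : Int))))) =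
    PySem.Dict.mk ((PySem.Set.ofList cs).map (fun k => (k,
      if (PySem.List.sorted (PySem.Set.ofList cs) (fun x => x) false).idxOf k < t
      then pvR cs ((PySem.List.sorted (PySem.Set.ofList cs) (fun x => x) false).idxOf k) else 1))) := by
  have hkeys : (PySem.Dict.counter cs).keys = PySem.Set.ofList cs := PySem.Dict.keys_counter cs
  set K := PySem.Set.ofList cs with hK
  set sk := PySem.List.sorted K (fun x => x) false with hsk
  have hlen : sk.length = K.length := PySem.List.length_sorted _ _ _
  have hperm : sk.Perm K := PySem.List.sorted_perm _ _ _
  have hndK : K.Nodup := PySem.Set.nodup_ofList cs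
  have hnd : sk.Nodup := hperm.nodup_iff.mpr hndK
  intro t
  induction t with
  | zero => intro _; simp [PySem.List.pyRange]
  | succ t ih =>
    intro ht
    by_cases ht0 : t = 0
    · subst ht0
      have h1 : PySem.List.pyRange 1 ((1 : Nat) : Int) 1 = [] := by decide
      rw [h1]
      simp only [List.foldl_nil]
      congr 1
      apply List.map_congr_left
      intro k hk
      split_ifs with hidx
      · have : sk.idxOf k = 0 := by omega
        rw [this]
        simp [pvR]
      · rfl
    · have h1t : (1 : Int) ≤ (t : Int) := by omega
      have htlen : t < sk.length := by omega
      have htlen1 : t - 1 < sk.length := by omega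
      rw [show ((t + 1 : Nat) : Int) = (t : Int) + 1 by push_cast; ring,
        PySem.List.pyRange_one_succ_right h1t, List.foldl_append, ih (by omega)]
      simp only [List.foldl_cons, List.foldl_nil, hkeys, ← hsk]
      -- evaluate prev and cur
      have hprev : PySem.List.pyGetD sk ((t : Int) - 1) "" = sk[t - 1] := by
        rw [show ((t : Int) - 1) = ((t - 1 : Nat) : Int) by omega]
        rw [PySem.List.pyGetD_natCast, List.getD_eq_getElem _ _ htlen1]
      have hcur : PySem.List.pyGetD sk ((t : Int)) "" = sk[t] := by
        rw [PySem.List.pyGetD_natCast, List.getD_eq_getElem _ _ htlen]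
      rw [hprev, hcur]
      have hprevK : sk[t - 1] ∈ K := hperm.mem_iff.mp (List.getElem_mem _)
      have hcurK : sk[t] ∈ K := hperm.mem_iff.mp (List.getElem_mem _)
      have hidxprev : sk.idxOf sk[t - 1] = t - 1 := List.Nodup.idxOf_getElem hnd _ _
      have hidxcur : sk.idxOf sk[t] = t := List.Nodup.idxOf_getElem hnd _ _
      have hndmk : (PySem.Dict.mk (K.map (fun k => (k,
          if sk.idxOf k < t then pvR cs (sk.idxOf k) else 1)))).keys.Nodup := by
        simp only [PySem.Dict.keys]
        simpa [Function.comp_def] using hndK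
      have hgetprev : (PySem.Dict.mk (K.map (fun k => (k,
          if sk.idxOf k < t then pvR cs (sk.idxOf k) else 1)))).getD sk[t - 1] 0 = pvR cs (t - 1) := by
        have hmem : (sk[t - 1], if sk.idxOf sk[t - 1] < t then pvR cs (sk.idxOf sk[t - 1]) else 1) ∈
            K.map (fun k => (k, if sk.idxOf k < t then pvR cs (sk.idxOf k) else 1)) :=
          List.mem_map_of_mem hprevK
        have := PySem.Dict.getD_of_mem_items _ hmem hndmk 0
        rwa [hidxprev, if_pos (by omega)] at this
      rw [hgetprev, PySem.Dict.getD_counter]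
      -- the insert updates exactly the entry of sk[t]
      have hcont : (PySem.Dict.mk (K.map (fun k => (k,
          if sk.idxOf k < t then pvR cs (sk.idxOf k) else 1)))).contains sk[t] = true := by
        apply (PySem.Dict.contains_iff_mem_keys _ _).mpr
        simp only [PySem.Dict.keys]
        simpa [Function.comp_def] using hcurK
      apply PySem.Dict.ext
      rw [PySem.Dict.items_insert_of_contains _ _ hcont]
      show (K.map _).map _ = K.map _
      rw [List.map_map]
      apply List.map_congr_left
      intro k hk
      simp only [Function.comp]
      by_cases hkc : k = sk[t]
      · subst hkc
        rw [if_pos (by simp)]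
        rw [hidxcur, if_pos (by omega)]
        have htake : sk.take t = sk.take (t - 1) ++ [sk[t - 1]] := by
          conv_lhs => rw [show t = (t - 1) + 1 by omega]
          rw [List.take_succ]
          simp [List.getElem?_eq_getElem htlen1]
        rw [pvR, pvR]
        rw [← hK, ← hsk, htake, List.map_append, List.sum_append]
        simp
        ring
      · rw [if_neg (by simpa using hkc)]
        have : sk.idxOf k ≠ t := by
          intro he
          apply hkc
          have hkmem : k ∈ sk := hperm.mem_iff.mpr hk
          have hg := List.getElem_idxOf (List.idxOf_lt_length_of_mem hkmem) (xs := sk) (x := k)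
          simp only [he] at hg
          exact hg.symm
        by_cases hlt' : sk.idxOf k < t
        · rw [if_pos hlt', if_pos (by omega)]
        · rw [if_neg hlt', if_neg (by omega)]

theorem pv_main (bwt : String) : initiate_lf_mapping_py bwt = initiate_lf_mapping_py_alt bwt := by
  unfold initiate_lf_mapping_py initiate_lf_mapping_py_alt
  set cs := bwt.toList.map Char.toString with hcs
  have hn : bwt.toList.length = cs.length := by simp [hcs]
  rw [hn]
  have hA := pv_loopA cs PySem.Dict.empty []
  simp only [List.nil_append, List.length_nil] at hA
  rw [show (0:Nat) = ([] : List Int).length from rfl] at hA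
  have hcnt : (List.foldl pvStepB (PySem.Dict.empty, []) cs).1 = PySem.Dict.counter cs := by
    rw [pv_stepB_fst]
    exact PySem.Dict.foldl_insert_getD_add_one_eq_counter cs
  have hA' : List.foldl pvStepA (PySem.Dict.empty, PySem.Dict.empty, List.replicate cs.length 0, 0) cs =
      (PySem.Dict.mk ((PySem.Set.ofList cs).map (fun k => (k, (1:Int)))),
       PySem.Dict.counter cs,
       (List.foldl pvStepB (PySem.Dict.empty, []) cs).2, cs.length) := by
    rw [show (0:Nat) = ([] : List Int).length from rfl]
    rw [hcnt, PySem.Dict.keys_counter] at hA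
    simp only [PySem.Dict.keys_empty, List.map_nil, List.length_nil, Nat.zero_add] at hA
    rw [show PySem.Dict.mk ([] : List (String × Int)) = PySem.Dict.empty from rfl] at hA
    exact hA
  dsimp only
  rw [hA']
  dsimp only
  have hsize : (PySem.Dict.counter cs).size = (PySem.Set.ofList cs).length := by
    rw [← PySem.Dict.keys_counter cs]
    simp [PySem.Dict.size, PySem.Dict.keys]
  rw [hsize, pv_loop2 cs (PySem.Set.ofList cs).length le_rfl, hcnt, PySem.Dict.keys_counter]
  dsimp only
  congr 1
  apply List.map_congr_left
  intro k hk
  have hkcs : k ∈ cs := (PySem.Set.mem_ofList cs k).mp hk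
  have hksk : k ∈ PySem.List.sorted (PySem.Set.ofList cs) (fun x => x) false := by
    rw [PySem.List.mem_sorted]
    exact hk
  have hidx : (PySem.List.sorted (PySem.Set.ofList cs) (fun x => x) false).idxOf k <
      (PySem.List.sorted (PySem.Set.ofList cs) (fun x => x) false).length :=
    List.idxOf_lt_length_of_mem hksk
  have hlensk : (PySem.List.sorted (PySem.Set.ofList cs) (fun x => x) false).length =
      (PySem.Set.ofList cs).length := PySem.List.length_sorted _ _ _
  rw [if_pos (by omega)]
  have hgk : (PySem.List.sorted (PySem.Set.ofList cs) (fun x => x) false)[(PySem.List.sorted (PySem.Set.ofList cs) (fun x => x) false).idxOf k]'hidx = k :=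
    List.getElem_idxOf hidx
  have hval := pv_take_sum cs _ hidx
  rw [hgk] at hval
  have hfirst : k ∈ PySem.List.sorted cs (fun x => x) false := by
    rw [PySem.List.mem_sorted]; exact hkcs
  have hpw : (PySem.List.sorted cs (fun x => x) false).Pairwise (· ≤ ·) := by
    simpa using PySem.List.sorted_pairwise cs (fun x => x)
  rw [pv_index_sorted k _ hpw hfirst]
  have hcntP : (PySem.List.sorted cs (fun x => x) false).countP (fun x => decide (x < k)) =
      cs.countP (fun x => decide (x < k)) := (PySem.List.sorted_perm cs _ _).countP_eq _
  rw [pvR, hval]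
  simp only [Option.getD_some, hcntP, Prod.mk.injEq, true_and]
  ring

-- ===== VERDICT (by name: the statement is the Claim_ definition above) =====
theorem initiate_lf_mapping_py_spec : Claim_equal_initiate_lf_mapping_py := by
  intro bwt _
  unfold Spec_initiate_lf_mapping_py
  exact pv_main bwt
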